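-- pv_equiv track=rewrite | github.com/leejongseok1/algorithm | codingtest/python/programmers_명예의_전당_(1).py | solution
-- ===== SOURCE A (Python) =====
-- def solution(k, score):
--     answer = []
--     rank = [] # 전당
--
--     for i in score:
--         if (len(rank) < k): # k번째 전까지는 명예의 전당에 추가
--             rank.append(i)
--         else:
--             if (i > min(rank)): # 명예의 전당 최하위보다 현재 스코어가 높다면
--                 rank.remove(min(rank)) # 최하위 삭제하고
--                 rank.append(i)         # 현재 점수 추가
--
--         rank.sort() # 오름차순 정렬
--         answer.append(rank[0])
--
--     return answer
-- ===== SOURCE B (Python) =====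
-- def solution(k, score):
--     # Each answer is direct: the k-th largest of the (i+1)-prefix, i.e. the
--     # element at index max(0, i+1-k) of the ascending-sorted prefix.
--     return [sorted(score[:i + 1])[max(0, i + 1 - k)] for i in range(len(score))]
-- ===== Notes on version B (the rewrite author's own statement) =====
-- stated objective: simpler
-- what changed: B computes each answer directly as the element at index max(0, i+1-k) of the sorted (i+1)-prefix in one stateless comprehension, with no maintained hall-of-fame list, no min() scan, no remove and no branching.
import Mathlib
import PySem

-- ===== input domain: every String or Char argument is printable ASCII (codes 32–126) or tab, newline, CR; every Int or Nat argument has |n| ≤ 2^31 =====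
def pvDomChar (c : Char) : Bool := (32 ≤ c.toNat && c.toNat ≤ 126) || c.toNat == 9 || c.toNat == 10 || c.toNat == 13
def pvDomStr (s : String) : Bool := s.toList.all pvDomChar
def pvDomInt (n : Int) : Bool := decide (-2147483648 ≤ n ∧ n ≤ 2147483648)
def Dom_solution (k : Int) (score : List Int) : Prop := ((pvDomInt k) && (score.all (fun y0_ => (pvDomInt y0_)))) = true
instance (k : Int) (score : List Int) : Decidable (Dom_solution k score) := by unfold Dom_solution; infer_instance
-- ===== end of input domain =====

-- B computes each answer directly as sorted(prefix)[max(0, i+1-k)] in one stateless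
-- comprehension — no maintained hall list, no min() scan, no remove, no branching ('simpler').

-- ===== PORT A =====
-- One loop iteration of A: update (answer, rank); `none` = the iteration raised (min() of []).
def solutionStepA (k : Int) (st : Option (List Int × List Int)) (i : Int) : Option (List Int × List Int) :=
  st.bind fun (answer, rank) =>
    (if (rank.length : Int) < k then
       some (rank ++ [i])                                   -- rank.append(i)
     else
       (PySem.List.min? rank (fun x => x)).bind fun m =>    -- min(rank); none = ValueError on []
         if i > m then
           (PySem.List.remove? rank m).map (· ++ [i])       -- rank.remove(min); rank.append(i)
         else
           some rank).bind fun rank1 =>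
      let rank2 := PySem.List.sorted rank1 (fun x => x)     -- rank.sort()
      (PySem.List.pyGet? rank2 0).map fun h => (answer ++ [h], rank2)  -- answer.append(rank[0])

def solution (k : Int) (score : List Int) : List Int :=
  ((score.foldl (solutionStepA k) (some ([], []))).map (·.1)).getD []

-- ===== PORT B =====
-- [sorted(score[:i+1])[max(0, i+1-k)] for i in range(len(score))]
-- (mapM: a raising index aborts the whole comprehension, as in Python)
def solution_alt (k : Int) (score : List Int) : List Int :=
  (((PySem.List.pyRange 0 (score.length : Int) 1).mapM (fun i =>
      PySem.List.pyGet?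
        (PySem.List.sorted (PySem.List.slice score none (some (i + 1))) (fun x => x))
        (max 0 (i + 1 - k)))).getD [])

-- ===== PRECONDITION & SPEC =====
-- Pre_ excludes exactly the inputs where A raises (k ≤ 0 with a nonempty score:
-- min() of the empty hall raises ValueError; B's out-of-range index raises IndexError there too).
def Pre_solution (k : Int) (score : List Int) : Prop := 1 ≤ k ∨ score = []
instance (k : Int) (score : List Int) : Decidable (Pre_solution k score) := by unfold Pre_solution; infer_instance
def pvWitness_solution : Int × List Int := (3, [10, 100, 20, 150, 1, 100, 200])
def Spec_solution (k : Int) (score : List Int) (out : List Int) : Prop := out = solution_alt k score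
instance (k : Int) (score : List Int) (out : List Int) : Decidable (Spec_solution k score out) := by unfold Spec_solution; infer_instance

-- ===== CLAIM (what is proved, stated in full; the proofs are below) =====
def Claim_equal_solution : Prop := ∀ (k : Int) (score : List Int), Dom_solution k score → Pre_solution k score → Spec_solution k score (solution k score)

-- ===== LEMMAS AND PROOFS =====

-- bisect-style insertion into a sorted list (proof-side tool: names the sorted list A rebuilds each step).
def pyInsort (top : List Int) (i : Int) : List Int :=
  PySem.List.insert top ((PySem.List.bisectRight top i : Nat) : Int) i

theorem pyInsort_pairwise (top : List Int) (i : Int) (hs : top.Pairwise (· ≤ ·)) :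
    (pyInsort top i).Pairwise (· ≤ ·) := by
  obtain ⟨hle, hlt, hgt⟩ := PySem.List.bisectRight_spec top i hs
  unfold pyInsort
  rw [PySem.List.insert_natCast top _ i hle, List.pairwise_append]
  refine ⟨hs.sublist (List.take_sublist _ _), ?_, ?_⟩
  · rw [List.pairwise_cons]
    refine ⟨?_, hs.sublist (List.drop_sublist _ _)⟩
    intro b hb
    obtain ⟨m, hm, hb'⟩ := List.mem_iff_getElem.mp hb
    have hm1 : PySem.List.bisectRight top i + m < top.length := by
      simp only [List.length_drop] at hm; omega
    have hb2 : b = top[PySem.List.bisectRight top i + m] := by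
      rw [← hb', List.getElem_drop]
    exact le_of_lt (hb2 ▸ hgt _ hm1 (by omega))
  · intro a ha b hb
    obtain ⟨n, hn, ha'⟩ := List.mem_iff_getElem.mp ha
    have hn1 : n < PySem.List.bisectRight top i ∧ n < top.length := by
      simp only [List.length_take] at hn; omega
    have ha2 : a = top[n]'hn1.2 := by rw [← ha', List.getElem_take]
    have hai : a ≤ i := ha2 ▸ hlt n hn1.2 hn1.1
    rcases List.mem_cons.mp hb with rfl | hb
    · exact hai
    · obtain ⟨m, hm, hb'⟩ := List.mem_iff_getElem.mp hb
      have hm1 : PySem.List.bisectRight top i + m < top.length := by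
        simp only [List.length_drop] at hm; omega
      have hb2 : b = top[PySem.List.bisectRight top i + m] := by
        rw [← hb', List.getElem_drop]
      exact le_trans hai (le_of_lt (hb2 ▸ hgt _ hm1 (by omega)))

theorem pyInsort_perm (top : List Int) (i : Int) (hs : top.Pairwise (· ≤ ·)) :
    (pyInsort top i).Perm (i :: top) := by
  obtain ⟨hle, -, -⟩ := PySem.List.bisectRight_spec top i hs
  unfold pyInsort
  rw [PySem.List.insert_natCast top _ i hle]
  calc (top.take _ ++ i :: top.drop _).Perm (i :: (top.take _ ++ top.drop _)) := List.perm_middle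
    _ = i :: top := by rw [List.take_append_drop]

theorem pyInsort_eq_sorted (top : List Int) (i : Int) (hs : top.Pairwise (· ≤ ·)) :
    PySem.List.sorted (top ++ [i]) (fun x => x) = pyInsort top i :=
  PySem.List.sorted_id_eq_of_perm_of_pairwise _ _
    ((pyInsort_perm top i hs).trans
      (by simpa using (List.perm_middle (a := i) (l₁ := top) (l₂ := [])).symm))
    (pyInsort_pairwise top i hs)

theorem length_pyInsort (top : List Int) (i : Int) : (pyInsort top i).length = top.length + 1 := by
  unfold pyInsort
  exact PySem.List.length_insert _ _ _

theorem min?_sorted_head (h : Int) (t : List Int) (hs : (h :: t).Pairwise (· ≤ ·)) :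
    PySem.List.min? (h :: t) (fun x => x) = some h := by
  rcases hm : PySem.List.min? (h :: t) (fun x => x) with _ | m
  · exact absurd ((PySem.List.min?_eq_none_iff _ _).mp hm) (by simp)
  · have h1 : m ≤ h := PySem.List.min?_isMin hm h (by simp)
    have h2 : h ≤ m := by
      rcases List.mem_cons.mp (PySem.List.min?_mem hm) with rfl | hmem
      · exact le_rfl
      · exact (List.pairwise_cons.mp hs).1 m hmem
    rw [le_antisymm h1 h2]

theorem pyGet?_zero_headI (xs : List Int) (h : xs ≠ []) :
    PySem.List.pyGet? xs 0 = some xs.headI := by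
  rcases xs with _ | ⟨a, t⟩
  · exact absurd rfl h
  · simp

-- sorting a snoc of any list = insort into the sorted list
theorem sortedSnoc (q : List Int) (i : Int) :
    PySem.List.sorted (q ++ [i]) (fun x => x) = pyInsort (PySem.List.sorted q (fun x => x)) i := by
  have hsp : (PySem.List.sorted q (fun x => x)).Pairwise (· ≤ ·) :=
    PySem.List.sorted_pairwise q (fun x => x)
  apply PySem.List.sorted_id_eq_of_perm_of_pairwise
  · exact ((pyInsort_perm _ i hsp).trans
      (((PySem.List.sorted_perm q (fun x => x) false).cons i).trans
        (by simpa using (List.perm_middle (a := i) (l₁ := q) (l₂ := [])).symm)))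
  · exact pyInsort_pairwise _ i hsp

-- i strictly above the current k-th largest: insort then drop one more = drop-head-then-append, sorted
theorem sorted_drop_succ_insort (s : List Int) (hs : s.Pairwise (· ≤ ·)) (i : Int)
    (m : Nat) (hm : m < s.length) (hgt_i : s[m] < i) :
    PySem.List.sorted (s.drop (m+1) ++ [i]) (fun x => x) = (pyInsort s i).drop (m+1) := by
  obtain ⟨hle, hlt, hgt⟩ := PySem.List.bisectRight_spec s i hs
  have hpos : m + 1 ≤ PySem.List.bisectRight s i := by
    by_contra hcon
    exact absurd (hgt m hm (by omega)) (by omega)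
  apply PySem.List.sorted_id_eq_of_perm_of_pairwise
  · have hrepr : pyInsort s i =
        s.take (PySem.List.bisectRight s i) ++ i :: s.drop (PySem.List.bisectRight s i) := by
      unfold pyInsort
      rw [PySem.List.insert_natCast s _ i hle]
    have htl : (s.take (PySem.List.bisectRight s i)).length = PySem.List.bisectRight s i := by
      simp [List.length_take]; omega
    have hglue : (s.take (PySem.List.bisectRight s i)).drop (m+1) ++
        s.drop (PySem.List.bisectRight s i) = s.drop (m+1) := by
      rw [List.drop_take]
      have hdd : s.drop (PySem.List.bisectRight s i) =
          (s.drop (m+1)).drop (PySem.List.bisectRight s i - (m+1)) := by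
        rw [List.drop_drop]
        congr 1
        omega
      rw [hdd, List.take_append_drop]
    rw [hrepr, List.drop_append, htl]
    have h0 : m + 1 - PySem.List.bisectRight s i = 0 := by omega
    rw [h0, List.drop_zero]
    have p1 : ((s.take (PySem.List.bisectRight s i)).drop (m+1) ++
        i :: s.drop (PySem.List.bisectRight s i)).Perm (i :: s.drop (m+1)) := by
      have hmid := List.perm_middle (a := i)
        (l₁ := (s.take (PySem.List.bisectRight s i)).drop (m+1))
        (l₂ := s.drop (PySem.List.bisectRight s i))
      rwa [hglue] at hmid
    exact p1.trans
      (by simpa using (List.perm_middle (a := i) (l₁ := s.drop (m+1)) (l₂ := [])).symm)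
  · exact (pyInsort_pairwise s i hs).sublist (List.drop_sublist _ _)

-- i not above the current k-th largest: insort then drop one more = the old hall unchanged
theorem drop_succ_insort_eq (s : List Int) (hs : s.Pairwise (· ≤ ·)) (i : Int)
    (m : Nat) (hm : m < s.length) (hle_i : i ≤ s[m]) :
    (pyInsort s i).drop (m+1) = s.drop m := by
  obtain ⟨hle, hlt, hgt⟩ := PySem.List.bisectRight_spec s i hs
  have hrepr : pyInsort s i =
      s.take (PySem.List.bisectRight s i) ++ i :: s.drop (PySem.List.bisectRight s i) := by
    unfold pyInsort
    rw [PySem.List.insert_natCast s _ i hle]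
  have hmono : ∀ (a b : Nat) (ha : a < s.length) (hb : b < s.length), a ≤ b → s[a] ≤ s[b] := by
    intro a b ha hb hab
    rcases eq_or_lt_of_le hab with rfl | hab'
    · exact le_rfl
    · exact List.pairwise_iff_getElem.mp hs a b ha hb hab'
  have hseg : ∀ (t : Nat) (ht : t < s.length), m ≤ t → t < PySem.List.bisectRight s i →
      s[t] = i := by
    intro t ht h1 h2
    exact le_antisymm (hlt t ht h2) (le_trans hle_i (hmono m t hm ht h1))
  have hlenins : (pyInsort s i).length = s.length + 1 := length_pyInsort s i
  have htl : (s.take (PySem.List.bisectRight s i)).length = PySem.List.bisectRight s i := by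
    simp [List.length_take]; omega
  rw [hrepr]
  apply List.ext_getElem
  · simp only [List.length_drop, List.length_append, List.length_cons, List.length_take]
    omega
  · intro j h1 h2
    simp only [List.getElem_drop]
    have hjm : m + j < s.length := by simp [List.length_drop] at h2; omega
    rcases lt_trichotomy (m + 1 + j) (PySem.List.bisectRight s i) with hc | hc | hc
    · rw [List.getElem_append_left (by omega : m + 1 + j < (s.take (PySem.List.bisectRight s i)).length),
        List.getElem_take]
      rw [hseg (m+1+j) (by omega) (by omega) hc, hseg (m+j) hjm (by omega) (by omega)]
    · rw [List.getElem_append_right (by omega : (s.take (PySem.List.bisectRight s i)).length ≤ m + 1 + j)]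
      have h0 : m + 1 + j - (s.take (PySem.List.bisectRight s i)).length = 0 := by omega
      simp only [h0, List.getElem_cons_zero]
      rw [hseg (m+j) hjm (by omega) (by omega)]
    · rw [List.getElem_append_right (by omega : (s.take (PySem.List.bisectRight s i)).length ≤ m + 1 + j)]
      have h0 : m + 1 + j - (s.take (PySem.List.bisectRight s i)).length =
          (m + 1 + j - PySem.List.bisectRight s i - 1) + 1 := by omega
      simp only [h0, List.getElem_cons_succ, List.getElem_drop]
      exact getElem_congr rfl (by omega) _

theorem pyInsort_ne_nil (top : List Int) (i : Int) : pyInsort top i ≠ [] := by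
  intro hnil
  have := length_pyInsort top i
  rw [hnil] at this
  simp at this

-- One iteration of A, on a hall that is the (|s|-k)-tail of the sorted multiset s of scores seen.
theorem stepA_char (k : Int) (hk : 1 ≤ k) (ans s : List Int) (hs : s.Pairwise (· ≤ ·)) (i : Int) :
    solutionStepA k (some (ans, s.drop (s.length - k.toNat))) i =
      some (ans ++ [((pyInsort s i).drop (s.length + 1 - k.toNat)).headI],
            (pyInsort s i).drop (s.length + 1 - k.toNat)) := by
  by_cases hnK : s.length < k.toNat
  · -- hall not yet full: append and re-sort = insort into s
    have hdrop0 : s.length - k.toNat = 0 := by omega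
    have hdrop1 : s.length + 1 - k.toNat = 0 := by omega
    have hcond : ((s.length : Int)) < k := by omega
    rw [hdrop0, hdrop1, List.drop_zero, List.drop_zero]
    unfold solutionStepA
    simp only [Option.bind_some]
    rw [if_pos hcond]
    simp only [Option.bind_some]
    rw [pyInsort_eq_sorted s i hs, pyGet?_zero_headI _ (pyInsort_ne_nil s i)]
    simp
  · -- hall full (length k)
    have hm : s.length - k.toNat < s.length := by omega
    have hdropcons : s.drop (s.length - k.toNat) =
        s[s.length - k.toNat] :: s.drop (s.length - k.toNat + 1) :=
      List.drop_eq_getElem_cons hm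
    have hpw_drop : (s.drop (s.length - k.toNat)).Pairwise (· ≤ ·) :=
      hs.sublist (List.drop_sublist _ _)
    have hcond : ¬ (((s.drop (s.length - k.toNat)).length : Int) < k) := by
      simp only [List.length_drop]
      omega
    have hmin : PySem.List.min? (s.drop (s.length - k.toNat)) (fun x => x) =
        some s[s.length - k.toNat] := by
      rw [hdropcons]
      exact min?_sorted_head _ _ (hdropcons ▸ hpw_drop)
    have hlen2 : s.length + 1 - k.toNat = (s.length - k.toNat) + 1 := by omega
    by_cases hgt_i : s[s.length - k.toNat] < i
    · have hrem : PySem.List.remove? (s.drop (s.length - k.toNat)) s[s.length - k.toNat] =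
          some (s.drop (s.length - k.toNat + 1)) := by
        rw [hdropcons]
        exact PySem.List.remove?_cons_self _ _
      have hE1 := sorted_drop_succ_insort s hs i (s.length - k.toNat) hm hgt_i
      have hne : (pyInsort s i).drop (s.length - k.toNat + 1) ≠ [] := by
        intro hnil
        have hl := length_pyInsort s i
        apply_fun List.length at hnil
        simp only [List.length_drop, hl, List.length_nil] at hnil
        omega
      unfold solutionStepA
      rw [hlen2]
      simp only [Option.bind_some]
      rw [if_neg hcond, hmin]
      simp only [Option.bind_some]
      rw [if_pos hgt_i, hrem]
      simp only [Option.map_some, Option.bind_some, hE1]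
      rw [pyGet?_zero_headI _ hne]
      simp
    · have hle_i : i ≤ s[s.length - k.toNat] := not_lt.mp hgt_i
      have hE2 := drop_succ_insort_eq s hs i (s.length - k.toNat) hm hle_i
      have hsortself : PySem.List.sorted (s.drop (s.length - k.toNat)) (fun x => x) =
          s.drop (s.length - k.toNat) :=
        PySem.List.sorted_eq_self_of_pairwise _ _ hpw_drop
      have hne : s.drop (s.length - k.toNat) ≠ [] := by
        rw [hdropcons]; exact List.cons_ne_nil _ _
      unfold solutionStepA
      rw [hlen2, hE2]
      simp only [Option.bind_some]
      rw [if_neg hcond, hmin]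
      simp only [Option.bind_some]
      rw [if_neg hgt_i]
      simp only [Option.bind_some, hsortself]
      rw [pyGet?_zero_headI _ hne]
      simp

-- outputs of A's loop from a given sorted multiset s of already-seen scores
def outsFrom (k : Int) (s : List Int) : List Int → List Int
  | [] => []
  | i :: rest => ((pyInsort s i).drop (s.length + 1 - k.toNat)).headI :: outsFrom k (pyInsort s i) rest

theorem foldA_char (k : Int) (hk : 1 ≤ k) : ∀ (rest ans s : List Int), s.Pairwise (· ≤ ·) →
    rest.foldl (solutionStepA k) (some (ans, s.drop (s.length - k.toNat))) =
    some (ans ++ outsFrom k s rest,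
          (rest.foldl pyInsort s).drop ((rest.foldl pyInsort s).length - k.toNat)) := by
  intro rest
  induction rest with
  | nil => intro ans s _; simp [outsFrom]
  | cons i rest ih =>
    intro ans s hsp
    rw [List.foldl_cons, stepA_char k hk ans s hsp i]
    have h1 : s.length + 1 - k.toNat = (pyInsort s i).length - k.toNat := by
      rw [length_pyInsort]
    rw [h1, ih _ _ (pyInsort_pairwise s i hsp)]
    simp [outsFrom, length_pyInsort]

-- the j-th answer, directly: head of the (len-k)-tail of the sorted (j+1)-prefix
def gOut (k : Int) (q : List Int) : Int :=
  ((PySem.List.sorted q (fun x => x)).drop (q.length - k.toNat)).headI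

theorem outsFrom_prefix (k : Int) : ∀ (rest p : List Int),
    outsFrom k (PySem.List.sorted p (fun x => x)) rest =
    (List.range rest.length).map (fun j => gOut k (p ++ rest.take (j+1))) := by
  intro rest
  induction rest with
  | nil => intro p; simp [outsFrom]
  | cons i rest ih =>
    intro p
    show ((pyInsort (PySem.List.sorted p (fun x => x)) i).drop _).headI :: _ = _
    rw [← sortedSnoc p i]
    have hlen : (PySem.List.sorted p (fun x => x)).length = p.length :=
      PySem.List.length_sorted p _ false
    have htl : outsFrom k (PySem.List.sorted (p ++ [i]) (fun x => x)) rest =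
        (List.range rest.length).map (fun j => gOut k ((p ++ [i]) ++ rest.take (j+1))) := ih (p ++ [i])
    rw [htl, hlen, List.length_cons, List.range_succ_eq_map, List.map_cons, List.map_map]
    congr 1
    · simp [gOut]
    · apply List.map_congr_left
      intro j hj
      simp [Function.comp, List.take_succ_cons, List.append_assoc]

theorem solutionA_eq (k : Int) (hk : 1 ≤ k) (score : List Int) :
    solution k score = outsFrom k [] score := by
  unfold solution
  have h0 : (some (([] : List Int), ([] : List Int))) =
      some (([] : List Int), ([] : List Int).drop (([] : List Int).length - k.toNat)) := by simp
  rw [h0, foldA_char k hk score [] [] (by simp)]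
  simp

theorem mapM_map_eq_some (f : Int → Option Int) (g : Nat → Int) :
    ∀ (l : List Nat), (∀ j ∈ l, f (j : Int) = some (g j)) →
      ((l.map (fun j : Nat => (j : Int))).mapM f) = some (l.map g) := by
  intro l
  induction l with
  | nil => intro _; rfl
  | cons a l ih =>
    intro hall
    rw [List.map_cons, List.mapM_cons, hall a (by simp), ih (fun j hj => hall j (by simp [hj]))]
    rfl

theorem solutionB_eq (k : Int) (hk : 1 ≤ k) (score : List Int) :
    solution_alt k score = (List.range score.length).map (fun j => gOut k (score.take (j+1))) := by
  unfold solution_alt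
  rw [PySem.List.pyRange_zero_nat score.length]
  rw [mapM_map_eq_some _ (fun j => gOut k (score.take (j+1))) (List.range score.length) ?_]
  · rfl
  · intro j hj
    have hjlen : j < score.length := List.mem_range.mp hj
    have hcast : ((j : Int) + 1) = (((j + 1 : Nat)) : Int) := by push_cast; ring
    rw [hcast, PySem.List.slice_to_natCast]
    have hlent : (score.take (j+1)).length = j + 1 := by
      rw [List.length_take]; omega
    have hlens : (PySem.List.sorted (score.take (j+1)) (fun x => x)).length = j + 1 := by
      rw [PySem.List.length_sorted, hlent]
    have hidx : max 0 (((j + 1 : Nat) : Int) - k) = (((j + 1) - k.toNat : Nat) : Int) := by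
      omega
    rw [hidx, PySem.List.pyGet?_natCast]
    have hb : (j + 1) - k.toNat < (PySem.List.sorted (score.take (j+1)) (fun x => x)).length := by
      rw [hlens]; omega
    rw [List.getElem?_eq_getElem hb]
    congr 1
    unfold gOut
    simp only [hlent]
    rw [List.drop_eq_getElem_cons (by rw [hlens]; omega : (j + 1) - k.toNat < _), List.headI_cons]

-- ===== VERDICT (by name: the statement is the Claim_ definition above) =====
theorem solution_spec : Claim_equal_solution := by
  intro k score _ hpre
  unfold Spec_solution
  rcases hpre with hk | rfl
  · rw [solutionA_eq k hk, solutionB_eq k hk]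
    have hnil : PySem.List.sorted ([] : List Int) (fun x => x) = [] :=
      PySem.List.sorted_eq_self_of_pairwise [] _ (by simp)
    have h := outsFrom_prefix k score []
    rw [hnil] at h
    rw [h]
    simp
  · simp [solution, solution_alt, PySem.List.pyRange_one_eq_nil]
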